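-- pv_equiv track=rewrite | github.com/multiful/Travel-QA | src/scoring/cluster_dispersion.py | count_area_backtracks
-- ===== SOURCE A (Python) =====
-- def count_area_backtracks(sigungu_codes: list[str]) -> int:
--     """M3: 시군구 기반 비연속 구역 재진입 횟수.
--
--     강남→홍대→강남 = 1, 순방향 4구역 순회 = 0.
--     """
--     seen: set[str] = set()
--     prev: str | None = None
--     count = 0
--     for code in sigungu_codes:
--         if code in seen and code != prev:
--             count += 1
--         seen.add(code)
--         prev = code
--     return count
-- ===== SOURCE B (Python) =====
-- from itertools import groupby
--
-- def count_area_backtracks(sigungu_codes: list[str]) -> int: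
--     """M3: non-contiguous re-entries = run count minus distinct run values.
--
--     Every maximal run after the first whose value occurred in an earlier run is
--     exactly one re-entry, so the answer is len(runs) - len(set(runs)).
--     """
--     runs = [code for code, _ in groupby(sigungu_codes)]
--     return len(runs) - len(set(runs))
-- ===== Notes on version B (the rewrite author's own statement) =====
-- stated objective: alternative
-- what changed: B replaces A's single-pass seen-set/prev conditional counter by two stages: compress the list into one representative per maximal run (itertools.groupby), then return the cardinality difference len(runs) - len(set(runs)) with no counter or conditional at all.
import Mathlib
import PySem

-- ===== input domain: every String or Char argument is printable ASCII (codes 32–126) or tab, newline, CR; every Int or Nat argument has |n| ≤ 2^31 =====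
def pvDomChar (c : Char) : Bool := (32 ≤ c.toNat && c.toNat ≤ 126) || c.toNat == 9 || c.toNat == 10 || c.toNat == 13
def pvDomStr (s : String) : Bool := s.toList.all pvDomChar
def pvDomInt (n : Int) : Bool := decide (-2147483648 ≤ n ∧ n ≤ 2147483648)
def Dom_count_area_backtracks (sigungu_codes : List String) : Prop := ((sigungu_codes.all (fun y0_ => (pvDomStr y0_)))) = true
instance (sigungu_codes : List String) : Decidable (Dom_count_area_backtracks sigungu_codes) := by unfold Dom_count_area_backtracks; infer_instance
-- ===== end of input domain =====

-- B counts re-entries as len(runs) - len(set(runs)) over the run-compressed list, instead of A's seen-set/prev conditional counter; alternative decomposition, same cost.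

-- ===== PORT A =====
-- state: (seen, prev, count); condition 'code in seen and code != prev'
def pvStepA (st : PySem.Set String × Option String × Int) (code : String) :
    PySem.Set String × Option String × Int :=
  (PySem.Set.add st.1 code, some code,
   if PySem.Set.contains st.1 code ∧ st.2.1 ≠ some code then st.2.2 + 1 else st.2.2)

def count_area_backtracks (sigungu_codes : List String) : Int :=
  (sigungu_codes.foldl pvStepA (PySem.Set.empty, none, 0)).2.2

-- ===== PORT B =====
-- itertools.groupby keys: one representative per maximal run
def pvRunsRest (p : String) : List String → List String
  | [] => []
  | y :: ys => if y = p then pvRunsRest p ys else y :: pvRunsRest y ys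

def pvRuns : List String → List String
  | [] => []
  | x :: xs => x :: pvRunsRest x xs

def count_area_backtracks_alt (sigungu_codes : List String) : Int :=
  PySem.List.len (pvRuns sigungu_codes) - PySem.Set.len (PySem.Set.ofList (pvRuns sigungu_codes))

-- ===== PRECONDITION & SPEC =====
def Spec_count_area_backtracks (sigungu_codes : List String) (out : Int) : Prop := out = count_area_backtracks_alt sigungu_codes
instance (sigungu_codes : List String) (out : Int) : Decidable (Spec_count_area_backtracks sigungu_codes out) := by unfold Spec_count_area_backtracks; infer_instance

-- ===== CLAIM (what is proved, stated in full; the proofs are below) =====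
def Claim_equal_count_area_backtracks : Prop := ∀ (sigungu_codes : List String), Dom_count_area_backtracks sigungu_codes → Spec_count_area_backtracks sigungu_codes (count_area_backtracks sigungu_codes)

-- ===== LEMMAS AND PROOFS =====
theorem pv_add_mem (s : PySem.Set String) (x : String) (h : PySem.Set.contains s x = true) :
    PySem.Set.add s x = s := by
  have : x ∈ s := by simpa [PySem.Set.contains] using h
  simp [PySem.Set.add, this]

theorem pv_contains_add_self (s : PySem.Set String) (x : String) :
    PySem.Set.contains (PySem.Set.add s x) x = true := by
  simp [PySem.Set.contains, PySem.Set.add]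
  by_cases h : x ∈ s <;> simp [h]

theorem pv_add_len (s : PySem.Set String) (x : String) :
    (PySem.Set.add s x).length = if PySem.Set.contains s x then s.length else s.length + 1 := by
  by_cases h : x ∈ s <;> simp [PySem.Set.add, PySem.Set.contains, h]

-- A's loop, over the run-compressed tail: count = run count minus newly-seen distinct values
theorem pv_loop_eq (xs : List String) : ∀ (s : PySem.Set String) (p : String) (c : Int),
    PySem.Set.contains s p = true →
    (xs.foldl pvStepA (s, some p, c)).2.2
      = c + (pvRunsRest p xs).length
          - (((PySem.Set.update s (pvRunsRest p xs)).length : Int) - (s.length : Int)) := by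
  induction xs with
  | nil => intro s p c _; simp [pvRunsRest, PySem.Set.update]
  | cons x xs ih =>
    intro s p c hp
    by_cases hxp : x = p
    · subst hxp
      have : pvStepA (s, some x, c) x = (s, some x, c) := by
        simp [pvStepA, pv_add_mem s x hp]
      simp only [List.foldl_cons, this, pvRunsRest]
      exact ih s x c hp
    · have hstep : pvStepA (s, some p, c) x =
          (PySem.Set.add s x, some x, if PySem.Set.contains s x then c + 1 else c) := by
        simp [pvStepA, Ne.symm hxp]
      simp only [List.foldl_cons, hstep, pvRunsRest, if_neg hxp, PySem.Set.update]
      rw [ih (PySem.Set.add s x) x _ (pv_contains_add_self s x)]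
      have hlen := pv_add_len s x
      by_cases hc : PySem.Set.contains s x = true
      · simp only [hc] at hlen ⊢
        simp [PySem.Set.update, hlen]
        ring
      · simp only [hc] at hlen ⊢
        simp [PySem.Set.update, hlen]
        ring

-- ===== VERDICT (by name: the statement is the Claim_ definition above) =====
theorem count_area_backtracks_spec : Claim_equal_count_area_backtracks := by
  unfold Claim_equal_count_area_backtracks
  intro xs _
  unfold Spec_count_area_backtracks count_area_backtracks count_area_backtracks_alt
  cases xs with
  | nil => rfl
  | cons x xs =>
    have h0 : pvStepA (PySem.Set.empty, none, 0) x = (PySem.Set.add PySem.Set.empty x, some x, 0) := by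
      simp [pvStepA, PySem.Set.contains, PySem.Set.empty]
    simp only [pvRuns, List.foldl_cons, h0]
    rw [pv_loop_eq xs _ x 0 (pv_contains_add_self PySem.Set.empty x)]
    have hof : PySem.Set.ofList (x :: pvRunsRest x xs)
        = PySem.Set.update (PySem.Set.add PySem.Set.empty x) (pvRunsRest x xs) := by
      simp [PySem.Set.ofList_eq_foldl, PySem.Set.update]
    simp [PySem.List.len, PySem.Set.len, hof, PySem.Set.add, PySem.Set.empty, PySem.Set.contains]
    ring
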